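-- pv_equiv track=rewrite | github.com/zhafen/verdict | real_verdict.py | check_if_jagged_arr
-- ===== SOURCE A (Python) =====
-- import copy
--
-- def check_if_jagged_arr( arr ):
--     '''Check if an array-like object is contains arrays of
--     different sizes.
--
--     Args:
--         arr: Object to check.
--
--     Returns:
--         bool:
--             True if an array-like object with arrays of different sizes.
--     '''
--
--     # Check if an array-like
--     try:
--         len_arr = len( arr )
--     except TypeError:
--         return False
--
--     if len_arr > 1:
--
--         for i, arr_i in enumerate( arr ):
--
--             # Check if an array
--             if is_array_like( arr_i ):
--                 l_current = len( arr_i )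
--             else:
--                 l_current = 0
--
--             # Check if jagged
--             if i != 0:
--                 if l_current != l_prev:
--                     return True
--             l_prev = copy.copy( l_current )
--
--             # Recurse
--             if check_if_jagged_arr( arr_i ):
--                 return True
--
--         # If got to this point, then it's even
--         return False
--
-- def is_array_like( a ):
--     '''Check if something is array-like.'''
--     return hasattr( a, '__len__' ) and not isinstance( a, str )
-- ===== SOURCE B (Python) =====
-- def check_if_jagged_arr( arr ):
--     '''Check if an array-like object contains arrays of different sizes.
--     Two separate passes: sibling jaggedness via a set of child sizes, then recursion.'''
--
--     # Check if an array-like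
--     try:
--         len_arr = len( arr )
--     except TypeError:
--         return False
--
--     if len_arr > 1:
--         # pass 1: sizes of the immediate children
--         lengths = [len(x) if is_array_like(x) else 0 for x in arr]
--         if len(set(lengths)) > 1:
--             return True
--         # pass 2: recurse
--         return any(check_if_jagged_arr(x) for x in arr)
--     # length 0/1: fall through (implicit None), like A
--
-- def is_array_like( a ):
--     '''Check if something is array-like.'''
--     return hasattr( a, '__len__' ) and not isinstance( a, str )
-- ===== Notes on version B (the rewrite author's own statement) =====
-- stated objective: alternative
-- what changed: A interleaves a stateful adjacent-length comparison (l_prev/l_current) with recursion inside one enumerate loop; B splits the work into two independent passes: a comprehension of child sizes judged jagged via len(set(lengths)) > 1, then a separate any() recursion pass.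
-- outside the precondition, e.g. on check_if_jagged_arr([[]]): A returns None, B returns None; on check_if_jagged_arr([]): A returns None, B returns None
import Mathlib
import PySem

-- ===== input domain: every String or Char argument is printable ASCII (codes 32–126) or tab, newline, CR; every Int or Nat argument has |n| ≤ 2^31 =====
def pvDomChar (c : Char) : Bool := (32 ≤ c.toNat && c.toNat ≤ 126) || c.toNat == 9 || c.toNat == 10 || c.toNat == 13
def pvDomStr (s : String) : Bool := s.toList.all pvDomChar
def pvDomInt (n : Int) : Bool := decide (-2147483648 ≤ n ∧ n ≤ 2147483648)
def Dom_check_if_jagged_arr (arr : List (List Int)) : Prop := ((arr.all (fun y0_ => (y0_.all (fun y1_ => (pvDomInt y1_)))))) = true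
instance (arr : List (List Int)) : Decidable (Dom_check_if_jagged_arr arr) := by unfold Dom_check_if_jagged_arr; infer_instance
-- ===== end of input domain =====

-- B replaces A's single stateful loop (adjacent-length comparison interleaved with recursion)
-- by two independent passes: a set of child sizes, then an any() recursion pass (objective: alternative).


-- ===== PORT A =====
-- A one level down: arr_i : List Int. len() succeeds; every element is an int, so
-- is_array_like(elem) is False (l_current = 0) and check_if_jagged_arr(elem) raises
-- TypeError inside, i.e. returns False. We transliterate that inner loop too.
def aInnerLoop : List Int → Nat → Int → Bool
  | [], _, _ => false
  | _ :: rest, i, l_prev =>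
      let l_current : Int := 0          -- is_array_like(int) = False
      if i ≠ 0 ∧ l_current ≠ l_prev then true
      else
        -- check_if_jagged_arr(int): len() raises TypeError → False, never returns True
        aInnerLoop rest (i + 1) l_current

def aInner (x : List Int) : Bool :=
  if 1 < x.length then aInnerLoop x 0 0
  else false                            -- implicit None, falsy in A's truth tests

def aLoop : List (List Int) → Nat → Int → Bool
  | [], _, _ => false
  | x :: rest, i, l_prev =>
      let l_current : Int := (x.length : Int)   -- is_array_like(list) = True
      if i ≠ 0 ∧ l_current ≠ l_prev then true
      else if aInner x then true                -- recurse
      else aLoop rest (i + 1) l_current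

def check_if_jagged_arr (arr : List (List Int)) : Bool :=
  if 1 < arr.length then aLoop arr 0 0          -- l_prev unbound before i=0, unread there
  else false                                    -- implicit None (outside Pre_)

-- ===== PORT B =====
-- B one level down: lengths = [0, 0, …], len(set) ≤ 1, then any() over ints, all falsy.
def bInner (x : List Int) : Bool :=
  if 1 < x.length then
    let lengths : List Int := x.map (fun _ => 0)     -- is_array_like(int) = False
    if 1 < (PySem.Set.ofList lengths).length then true
    else x.any (fun _ => false)   -- check_if_jagged_arr(int): TypeError → False
  else false                      -- implicit None, falsy in any()

def check_if_jagged_arr_alt (arr : List (List Int)) : Bool :=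
  if 1 < arr.length then
    let lengths : List Int := arr.map (fun x => (x.length : Int))
    if 1 < (PySem.Set.ofList lengths).length then true
    else arr.any bInner
  else false                      -- implicit None (outside Pre_)

-- ===== PRECONDITION & SPEC =====
-- Pre_ excludes arrays of length ≤ 1, on which the Python (both A and B) falls through
-- and returns None instead of a bool — no value of the declared return type.
def Pre_check_if_jagged_arr (arr : List (List Int)) : Prop := 1 < arr.length
instance (arr : List (List Int)) : Decidable (Pre_check_if_jagged_arr arr) := by unfold Pre_check_if_jagged_arr; infer_instance
def pvWitness_check_if_jagged_arr : List (List Int) := [[1], [2, 3]]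

def Spec_check_if_jagged_arr (arr : List (List Int)) (out : Bool) : Prop := out = check_if_jagged_arr_alt arr
instance (arr : List (List Int)) (out : Bool) : Decidable (Spec_check_if_jagged_arr arr out) := by unfold Spec_check_if_jagged_arr; infer_instance

-- ===== CLAIM (what is proved, stated in full; the proofs are below) =====
def Claim_equal_check_if_jagged_arr : Prop := ∀ (arr : List (List Int)), Dom_check_if_jagged_arr arr → Pre_check_if_jagged_arr arr → Spec_check_if_jagged_arr arr (check_if_jagged_arr arr)

-- ===== LEMMAS AND PROOFS =====

theorem aInnerLoop_false (l : List Int) (i : Nat) : aInnerLoop l i 0 = false := by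
  induction l generalizing i with
  | nil => rfl
  | cons x rest ih => simp [aInnerLoop, ih]

theorem aInner_false (x : List Int) : aInner x = false := by
  simp [aInner, aInnerLoop_false]

theorem len_le_one_of_nodup_all_eq {α : Type} {s : List α} {c : α}
    (hnd : s.Nodup) (h : ∀ y ∈ s, y = c) : s.length ≤ 1 := by
  rcases s with _ | ⟨a, _ | ⟨b, t⟩⟩
  · simp
  · simp
  · exfalso
    have ha := h a (by simp)
    have hb := h b (by simp)
    simp [List.nodup_cons] at hnd
    exact hnd.1.1 (ha.trans hb.symm)

theorem one_lt_len_of_two_mem {α : Type} {s : List α} {a b : α}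
    (ha : a ∈ s) (hb : b ∈ s) (hne : a ≠ b) : 1 < s.length := by
  rcases s with _ | ⟨c, _ | ⟨d, t⟩⟩
  · simp at ha
  · simp at ha hb
    exact absurd (ha.trans hb.symm) hne
  · simp

theorem ofList_const_le_one (l : List Int) (c : Int) (h : ∀ y ∈ l, y = c) :
    (PySem.Set.ofList l).length ≤ 1 :=
  len_le_one_of_nodup_all_eq (PySem.Set.nodup_ofList (xs := l))
    (fun y hy => h y ((PySem.Set.mem_ofList _ _).1 hy))

theorem ofList_two_distinct {l : List Int} {a b : Int}
    (ha : a ∈ l) (hb : b ∈ l) (hne : a ≠ b) : 1 < (PySem.Set.ofList l).length :=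
  one_lt_len_of_two_mem ((PySem.Set.mem_ofList _ _).2 ha) ((PySem.Set.mem_ofList _ _).2 hb) hne

theorem bInner_false (x : List Int) : bInner x = false := by
  unfold bInner
  split
  · have h1 : (PySem.Set.ofList (x.map (fun _ => (0 : Int)))).length ≤ 1 := by
      apply ofList_const_le_one _ 0
      intro y hy
      simp at hy
      exact hy.2
    rw [if_neg (Nat.not_lt.2 h1)]
    simp
  · rfl

-- aLoop with i ≠ 0 is true iff some remaining length differs from l_prev
-- (the scan re-anchors l_prev at each element, but the first difference already flags).
theorem aLoop_char (l : List (List Int)) (i : Nat) (p : Int) (hi : i ≠ 0) :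
    aLoop l i p = true ↔ ∃ y ∈ l, (y.length : Int) ≠ p := by
  induction l generalizing i p with
  | nil => simp [aLoop]
  | cons x rest ih =>
    simp only [aLoop, aInner_false, Bool.false_eq_true, if_false]
    by_cases hx : (x.length : Int) = p
    · rw [if_neg (by simp [hx]), hx, ih (i + 1) p (Nat.succ_ne_zero i)]
      simp [hx]
    · rw [if_pos ⟨hi, hx⟩]
      simp
      exact Or.inl hx

theorem check_if_jagged_arr_spec' (arr : List (List Int)) (h : 1 < arr.length) :
    check_if_jagged_arr arr = check_if_jagged_arr_alt arr := by
  match arr with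
  | [] => simp at h
  | x :: rest =>
    unfold check_if_jagged_arr check_if_jagged_arr_alt
    rw [if_pos h, if_pos h]
    simp only [List.map_cons]
    -- A side: at i = 0 the jagged check is skipped, aInner is false
    have hA : aLoop (x :: rest) 0 0 = aLoop rest 1 (x.length : Int) := by
      simp [aLoop, aInner_false]
    rw [hA]
    -- B side: the recursion pass is identically false
    have hAny : (x :: rest).any bInner = false := by
      simp [bInner_false]
    rw [hAny]
    by_cases hj : ∃ y ∈ rest, (y.length : Int) ≠ (x.length : Int)
    · obtain ⟨y, hy, hne⟩ := hj
      have hset : 1 < (PySem.Set.ofList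
          ((x.length : Int) :: rest.map (fun z => (z.length : Int)))).length :=
        ofList_two_distinct (a := (y.length : Int)) (b := (x.length : Int))
          (by simp; exact Or.inr ⟨y, hy, rfl⟩) (by simp) hne
      rw [(aLoop_char rest 1 (x.length : Int) one_ne_zero).2 ⟨y, hy, hne⟩, if_pos hset]
    · have hj' : ∀ y ∈ rest, (y.length : Int) = (x.length : Int) := by
        intro y hy
        by_contra hc
        exact hj ⟨y, hy, hc⟩
      have hset : (PySem.Set.ofList
          ((x.length : Int) :: rest.map (fun z => (z.length : Int)))).length ≤ 1 := by
        apply ofList_const_le_one _ ((x.length : Int))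
        intro y hy
        simp at hy
        rcases hy with h1 | ⟨z, hz, h2⟩
        · exact h1
        · rw [← h2]
          exact hj' z hz
      have hA' : aLoop rest 1 (x.length : Int) = false := by
        rw [Bool.eq_false_iff]
        intro hc
        obtain ⟨y, hy, hne⟩ := (aLoop_char rest 1 (x.length : Int) one_ne_zero).1 hc
        exact hne (hj' y hy)
      rw [hA', if_neg (Nat.not_lt.2 hset)]

-- ===== VERDICT (by name: the statement is the Claim_ definition above) =====
theorem check_if_jagged_arr_spec : Claim_equal_check_if_jagged_arr := by
  intro arr _ hpre
  exact check_if_jagged_arr_spec' arr hpre
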